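-- pv_equiv track=rewrite | github.com/ManishGovind/hadoop-hive | outlierRed.py | has_consecutive_missing_days
-- ===== SOURCE A (Python) =====
-- def has_consecutive_missing_days(days):
--     consecutive_missing_count = 0
--     for day in days:
--         if day == 'NAN':
--             consecutive_missing_count += 1
--             if consecutive_missing_count > 10:
--                 return True
--         else:
--             consecutive_missing_count = 0
--     return False
-- ===== SOURCE B (Python) =====
-- def has_consecutive_missing_days(days):
--     # Run-based scan: jump over each maximal run of equal values and test
--     # whether a 'NAN' run is longer than 10.
--     i, n = 0, len(days)
--     while i < n:
--         j = i
--         while j < n and days[j] == days[i]: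
--             j += 1
--         if days[i] == 'NAN' and j - i > 10:
--             return True
--         i = j
--     return False
-- ===== Notes on version B (the rewrite author's own statement) =====
-- stated objective: alternative
-- what changed: Replaces the per-element running-counter scan (with early return past 10) by a two-pointer scan over maximal runs of equal values, testing each 'NAN' run's length directly.
import Mathlib
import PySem

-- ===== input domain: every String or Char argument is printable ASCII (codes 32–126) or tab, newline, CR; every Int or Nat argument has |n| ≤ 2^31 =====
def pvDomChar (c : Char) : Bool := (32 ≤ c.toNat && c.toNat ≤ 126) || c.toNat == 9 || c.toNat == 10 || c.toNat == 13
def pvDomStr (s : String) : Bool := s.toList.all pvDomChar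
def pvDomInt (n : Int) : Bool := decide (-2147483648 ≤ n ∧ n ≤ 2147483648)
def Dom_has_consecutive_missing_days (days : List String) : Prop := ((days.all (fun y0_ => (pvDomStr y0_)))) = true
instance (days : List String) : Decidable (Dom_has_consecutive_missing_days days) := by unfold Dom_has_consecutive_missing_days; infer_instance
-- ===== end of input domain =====

-- B replaces A's per-element running counter by a scan over maximal runs of equal values (alternative decomposition, same cost).


-- ===== PORT A =====
-- the for-loop with running counter and early return, as structural recursion on the list
-- (the counter is a Python int that stays ≥ 0; modelled by Nat)
def pvAAux : List String → Nat → Bool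
  | [], _ => false
  | d :: rest, c =>
    if d == "NAN" then
      if c + 1 > 10 then true else pvAAux rest (c + 1)
    else pvAAux rest 0

def has_consecutive_missing_days (days : List String) : Bool := pvAAux days 0

-- ===== PORT B =====
-- the outer while-loop of Source B: each step consumes one maximal run of equal values
-- (the inner index scan j is takeWhile/dropWhile on the suffix; j - i = run length ≥ 0, modelled by Nat)
def pvBGo : List String → Bool
  | [] => false
  | d :: rest =>
    if d == "NAN" && decide (1 + (rest.takeWhile (· == d)).length > 10) then true
    else pvBGo (rest.dropWhile (· == d))
  termination_by l => l.length
  decreasing_by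
    simp only [List.length_cons]
    have := List.length_dropWhile_le (p := (· == d)) (l := rest)
    omega

def has_consecutive_missing_days_alt (days : List String) : Bool := pvBGo days

-- ===== PRECONDITION & SPEC =====
def Spec_has_consecutive_missing_days (days : List String) (out : Bool) : Prop := out = has_consecutive_missing_days_alt days
instance (days : List String) (out : Bool) : Decidable (Spec_has_consecutive_missing_days days out) := by unfold Spec_has_consecutive_missing_days; infer_instance

-- ===== CLAIM (what is proved, stated in full; the proofs are below) =====
def Claim_equal_has_consecutive_missing_days : Prop := ∀ (days : List String), Dom_has_consecutive_missing_days days → Spec_has_consecutive_missing_days days (has_consecutive_missing_days days)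

-- ===== LEMMAS AND PROOFS =====

-- scanning a block of non-"NAN" elements with counter 0 just re-resets the counter
lemma pvAAux_append_nonNan (l : List String) (t : List String)
    (h : ∀ x ∈ l, (x == "NAN") = false) :
    pvAAux (l ++ t) 0 = pvAAux t 0 := by
  induction l with
  | nil => rfl
  | cons a l ih =>
    have ha : (a == "NAN") = false := h a (by simp)
    simp only [List.cons_append, pvAAux, ha, Bool.false_eq_true, if_false]
    exact ih (fun x hx => h x (by simp [hx]))

-- one unfold of B expressed via the leading "NAN" run
lemma pvBGo_eq_lead (l : List String) :
    pvBGo l = (decide ((l.takeWhile (· == "NAN")).length > 10)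
               || pvBGo (l.dropWhile (· == "NAN"))) := by
  cases l with
  | nil => simp [pvBGo]
  | cons d rest =>
    by_cases hd : d = "NAN"
    · subst hd
      rw [pvBGo]
      by_cases hlen : (rest.takeWhile (· == "NAN")).length + 1 > 10
      · simp [List.takeWhile_cons, List.dropWhile_cons, Nat.add_comm, hlen]
      · simp [List.takeWhile_cons, List.dropWhile_cons, Nat.add_comm, hlen]
    · have hbeq : (d == "NAN") = false := beq_eq_false_iff_ne.mpr hd
      simp [List.takeWhile_cons, List.dropWhile_cons, hbeq]

-- main invariant: A's scan with counter c ≤ 10 equals "leading NAN run pushes c over 10, or B on the rest"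
lemma pvAAux_eq (n : Nat) : ∀ (days : List String), days.length ≤ n → ∀ c : Nat, c ≤ 10 →
    pvAAux days c = (decide (c + (days.takeWhile (· == "NAN")).length > 10)
                     || pvBGo (days.dropWhile (· == "NAN"))) := by
  induction n with
  | zero =>
    intro days hlen c h10
    have : days = [] := List.eq_nil_of_length_eq_zero (Nat.le_zero.mp hlen)
    subst this
    simp [pvAAux, pvBGo]; omega
  | succ n ih =>
    intro days hlen c h10
    cases days with
    | nil => simp [pvAAux, pvBGo]; omega
    | cons d rest =>
      have hlen' : rest.length ≤ n := by simp [List.length_cons] at hlen; omega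
      by_cases hd : d = "NAN"
      · subst hd
        by_cases hc : c + 1 > 10
        · have h1 : c + ((rest.takeWhile (· == "NAN")).length + 1) > 10 := by omega
          simp [pvAAux, hc]
          exact Or.inl (by omega)
        · have hstep : pvAAux ("NAN" :: rest) c = pvAAux rest (c + 1) := by
            simp [pvAAux, hc]
          rw [hstep, ih rest hlen' (c + 1) (by omega)]
          have htake : ("NAN" :: rest).takeWhile (· == "NAN")
              = "NAN" :: rest.takeWhile (· == "NAN") := by simp [List.takeWhile_cons]
          have hdrop : ("NAN" :: rest).dropWhile (· == "NAN")
              = rest.dropWhile (· == "NAN") := by simp [List.dropWhile_cons]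
          rw [htake, hdrop, List.length_cons]
          rw [show (decide (c + 1 + (rest.takeWhile (· == "NAN")).length > 10))
              = decide (c + ((rest.takeWhile (· == "NAN")).length + 1) > 10)
              from decide_eq_decide.mpr (by omega)]
      · have hbeq : (d == "NAN") = false := beq_eq_false_iff_ne.mpr hd
        have hstep : pvAAux (d :: rest) c = pvAAux rest 0 := by
          simp [pvAAux, hbeq]
        have hsplit := List.takeWhile_append_dropWhile (p := (· == d)) (l := rest)
        have hrun : ∀ x ∈ rest.takeWhile (· == d), (x == "NAN") = false := by
          intro x hx
          have hxd : (x == d) = true :=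
            List.mem_takeWhile_imp (p := fun y => y == d) hx
          rw [eq_of_beq hxd]; exact hbeq
        have h1 : pvAAux rest 0 = pvAAux (rest.dropWhile (· == d)) 0 := by
          conv_lhs => rw [← hsplit]
          exact pvAAux_append_nonNan _ _ hrun
        have htail : (rest.dropWhile (· == d)).length ≤ n :=
          le_trans (List.length_dropWhile_le _ _) hlen'
        have htake : (d :: rest).takeWhile (· == "NAN") = [] := by
          simp [List.takeWhile_cons, hbeq]
        have hdrop : (d :: rest).dropWhile (· == "NAN") = d :: rest := by
          simp [List.dropWhile_cons, hbeq]
        have hb : pvBGo (d :: rest) = pvBGo (rest.dropWhile (· == d)) := by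
          rw [pvBGo]; simp [hbeq]
        rw [hstep, h1, ih _ htail 0 (by omega), Nat.zero_add, ← pvBGo_eq_lead,
          htake, hdrop, hb]
        rw [show (decide (c + ([] : List String).length > 10)) = false
          from decide_eq_false (by simp; omega)]
        simp

-- ===== VERDICT (by name: the statement is the Claim_ definition above) =====
theorem has_consecutive_missing_days_spec : Claim_equal_has_consecutive_missing_days := by
  intro days _
  unfold Spec_has_consecutive_missing_days has_consecutive_missing_days has_consecutive_missing_days_alt
  rw [pvAAux_eq days.length days (le_refl _) 0 (by omega), Nat.zero_add, ← pvBGo_eq_lead]
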